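-- pv_equiv track=rewrite | github.com/sanj2evk-star/cryptomind | app/replay.py | match_trades_to_decisions
-- ===== SOURCE A (Python) =====
-- def match_trades_to_decisions(trades: list[dict], decisions: list[dict]) -> list[dict]:
--     """Pair each trade with the closest decision by timestamp.
--
--     Matches each trade to the decision with the nearest preceding timestamp.
--
--     Args:
--         trades: List of trade dicts.
--         decisions: List of decision dicts.
--
--     Returns:
--         List of combined dicts with trade + decision fields.
--     """
--     paired = []
--
--     for trade in trades:
--         trade_ts = trade.get("timestamp", "")
--
--         # Find the latest decision at or before this trade
--         best_decision = {}
--         for d in decisions: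
--             d_ts = d.get("timestamp", "")
--             if d_ts <= trade_ts:
--                 best_decision = d
--             else:
--                 break
--
--         paired.append({
--             "trade": trade,
--             "decision": best_decision,
--         })
--
--     return paired
-- ===== SOURCE B (Python) =====
-- def match_trades_to_decisions(trades: list[dict], decisions: list[dict]) -> list[dict]:
--     """Pair each trade with the closest decision by timestamp.
--
--     One pass builds the running maximum of decision timestamps; each trade
--     then binary-searches that non-decreasing array for the cut-off index.
--     """
--     prefix_max = []
--     run = ""
--     for d in decisions:
--         t = d.get("timestamp", "")
--         if run < t:
--             run = t
--         prefix_max.append(run)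
--
--     paired = []
--     for trade in trades:
--         t = trade.get("timestamp", "")
--         lo, hi = 0, len(prefix_max)
--         while lo < hi:
--             mid = (lo + hi) // 2
--             if t < prefix_max[mid]:
--                 hi = mid
--             else:
--                 lo = mid + 1
--         paired.append({
--             "trade": trade,
--             "decision": decisions[lo - 1] if lo > 0 else {},
--         })
--     return paired
-- ===== Notes on version B (the rewrite author's own statement) =====
-- stated objective: alternative
-- what changed: Instead of re-scanning the decisions list for every trade until the first later timestamp, B precomputes the running maximum of decision timestamps once and binary-searches that non-decreasing array per trade for the cut-off index.
import Mathlib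
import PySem

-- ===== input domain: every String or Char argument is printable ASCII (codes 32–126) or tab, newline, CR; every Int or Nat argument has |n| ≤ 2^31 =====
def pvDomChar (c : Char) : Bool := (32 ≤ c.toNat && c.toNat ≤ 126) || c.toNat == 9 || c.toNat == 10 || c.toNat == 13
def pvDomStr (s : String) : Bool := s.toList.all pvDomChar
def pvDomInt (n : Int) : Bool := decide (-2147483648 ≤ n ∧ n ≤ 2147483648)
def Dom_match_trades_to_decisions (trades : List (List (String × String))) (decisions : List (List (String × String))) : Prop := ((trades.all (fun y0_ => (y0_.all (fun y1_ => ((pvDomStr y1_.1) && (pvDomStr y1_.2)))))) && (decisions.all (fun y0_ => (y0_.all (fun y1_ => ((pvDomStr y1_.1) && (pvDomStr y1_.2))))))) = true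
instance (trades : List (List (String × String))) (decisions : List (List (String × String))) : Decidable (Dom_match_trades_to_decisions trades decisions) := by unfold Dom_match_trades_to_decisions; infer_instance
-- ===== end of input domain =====

-- B replaces A's per-trade linear scan of `decisions` with one running-maximum pass plus
-- a per-trade binary search on that non-decreasing array (alternative algorithm).

-- d.get("timestamp", "")  (first-match association-list lookup, Python dict semantics)
def pvTsOf (d : List (String × String)) : String :=
  PySem.Dict.getD (PySem.Dict.mk d) "timestamp" ""

-- ===== PORT A =====
-- A's inner `for d in decisions: … else: break` loop
def pvInnerA (t : String) (ds : List (List (String × String)))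
    (best : List (String × String)) : List (String × String) :=
  match ds with
  | [] => best
  | d :: rest => if pvTsOf d ≤ t then pvInnerA t rest d else best

def match_trades_to_decisions (trades : List (List (String × String))) (decisions : List (List (String × String))) : List (List (String × List (String × String))) :=
  trades.foldl
    (fun paired trade =>
      let trade_ts := pvTsOf trade
      let best_decision := pvInnerA trade_ts decisions []
      paired ++ [[("trade", trade), ("decision", best_decision)]])
    []

-- ===== PORT B =====
-- running maximum of decision timestamps (Source B's first loop); state = (prefix_max, run)
def pvPrefixMax (ds : List (List (String × String))) : List String :=
  (ds.foldl
    (fun (st : List String × String) d =>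
      let t := pvTsOf d
      let run := if st.2 < t then t else st.2
      (st.1 ++ [run], run))
    ([], "")).1

-- Source B's `while lo < hi` binary-search loop (fuel = hi - lo bounds the iterations;
-- structural recursion so the kernel can evaluate it)
def pvBisectGo (pm : List String) (t : String) : Nat → Nat → Nat → Nat
  | 0, lo, _ => lo
  | f + 1, lo, hi =>
    if lo < hi then
      let mid := (lo + hi) / 2
      if t < pm.getD mid "" then pvBisectGo pm t f lo mid
      else pvBisectGo pm t f (mid + 1) hi
    else lo

def pvBisect (pm : List String) (t : String) (lo hi : Nat) : Nat :=
  pvBisectGo pm t (hi - lo) lo hi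

def match_trades_to_decisions_alt (trades : List (List (String × String))) (decisions : List (List (String × String))) : List (List (String × List (String × String))) :=
  let pm := pvPrefixMax decisions
  trades.foldl
    (fun paired trade =>
      let t := pvTsOf trade
      let lo := pvBisect pm t 0 pm.length
      paired ++ [[("trade", trade),
                  ("decision", if 0 < lo then decisions.getD (lo - 1) [] else [])]])
    []

-- ===== PRECONDITION & SPEC =====
def Spec_match_trades_to_decisions (trades : List (List (String × String))) (decisions : List (List (String × String))) (out : List (List (String × List (String × String)))) : Prop := out = match_trades_to_decisions_alt trades decisions
instance (trades : List (List (String × String))) (decisions : List (List (String × String))) (out : List (List (String × List (String × String)))) : Decidable (Spec_match_trades_to_decisions trades decisions out) := by unfold Spec_match_trades_to_decisions; infer_instance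

-- ===== CLAIM (what is proved, stated in full; the proofs are below) =====
def Claim_equal_match_trades_to_decisions : Prop := ∀ (trades : List (List (String × String))) (decisions : List (List (String × String))), Dom_match_trades_to_decisions trades decisions → Spec_match_trades_to_decisions trades decisions (match_trades_to_decisions trades decisions)

-- ===== LEMMAS AND PROOFS =====

-- length of the prefix of `ds` whose timestamps are ≤ t (the index A's break stops at)
def pvCut (t : String) (xs : List String) : Nat :=
  match xs with
  | [] => 0
  | x :: r => if x ≤ t then pvCut t r + 1 else 0

theorem pvCut_le_length (t : String) (xs : List String) : pvCut t xs ≤ xs.length := by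
  induction xs with
  | nil => simp [pvCut]
  | cons x r ih => simp only [pvCut, List.length_cons]; split <;> omega

-- A's inner loop returns ds[cut-1] (or `best` when cut = 0)
theorem pvInnerA_eq (t : String) (ds : List (List (String × String)))
    (best : List (String × String)) :
    pvInnerA t ds best =
      if pvCut t (ds.map pvTsOf) = 0 then best
      else ds.getD (pvCut t (ds.map pvTsOf) - 1) [] := by
  induction ds generalizing best with
  | nil => simp [pvInnerA, pvCut]
  | cons d r ih =>
    simp only [pvInnerA, List.map_cons, pvCut]
    by_cases h : pvTsOf d ≤ t
    · simp only [h, if_pos]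
      rw [ih]
      by_cases h0 : pvCut t (r.map pvTsOf) = 0
      · simp [h0]
      · have h1 : pvCut t (r.map pvTsOf) + 1 - 1 = (pvCut t (r.map pvTsOf) - 1) + 1 := by omega
        simp [h0, h1]
    · simp [h]

-- the recursive form of pvPrefixMax's fold
def pvPmList (run : String) (xs : List String) : List String :=
  match xs with
  | [] => []
  | x :: r =>
    let run' := if run < x then x else run
    run' :: pvPmList run' r

theorem pvPrefixMax_foldl (ds : List (List (String × String))) (acc : List String) (run : String) :
    (ds.foldl
      (fun (st : List String × String) d =>
        let t := pvTsOf d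
        let run := if st.2 < t then t else st.2
        (st.1 ++ [run], run))
      (acc, run)).1 = acc ++ pvPmList run (ds.map pvTsOf) := by
  induction ds generalizing acc run with
  | nil => simp [pvPmList]
  | cons d r ih =>
    simp only [List.foldl_cons, List.map_cons, pvPmList]
    rw [ih, List.append_assoc]
    rfl

theorem pvPmList_length (run : String) (xs : List String) :
    (pvPmList run xs).length = xs.length := by
  induction xs generalizing run with
  | nil => rfl
  | cons x r ih => simp [pvPmList, ih]

theorem pvPmList_ge (run : String) (xs : List String) :
    ∀ y ∈ pvPmList run xs, run ≤ y := by
  induction xs generalizing run with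
  | nil => simp [pvPmList]
  | cons x r ih =>
    intro y hy
    simp only [pvPmList, List.mem_cons] at hy
    rcases hy with rfl | hy
    · split <;> simp_all [le_of_lt]
    · have := ih (if run < x then x else run) y hy
      split at this <;> [exact le_trans (le_of_lt (by assumption)) this; exact this]

-- the running maximum is ≤ t exactly on the prefix A's break keeps
theorem pvPmList_char (t run : String) (xs : List String) (hrun : run ≤ t) :
    ∀ i (hi : i < (pvPmList run xs).length),
      ((pvPmList run xs)[i] ≤ t ↔ i < pvCut t xs) := by
  induction xs generalizing run with
  | nil => intro i hi; simp [pvPmList] at hi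
  | cons x r ih =>
    intro i hi
    have hcons : pvPmList run (x :: r)
        = (if run < x then x else run) :: pvPmList (if run < x then x else run) r := rfl
    by_cases hx : x ≤ t
    · have hrun' : (if run < x then x else run) ≤ t := by split <;> [exact hx; exact hrun]
      have hcut : pvCut t (x :: r) = pvCut t r + 1 := by simp [pvCut, hx]
      match i with
      | 0 =>
        rw [hcut]
        simp only [hcons, List.getElem_cons_zero]
        exact iff_of_true hrun' (Nat.succ_pos _)
      | Nat.succ j =>
        have hj : j < (pvPmList (if run < x then x else run) r).length := by
          rw [hcons] at hi; simp only [List.length_cons] at hi; omega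
        rw [hcut]
        simp only [hcons, List.getElem_cons_succ]
        rw [ih _ hrun' j hj]
        omega
    · have hx' : t < x := not_le.mp hx
      have hrun' : t < (if run < x then x else run) := by
        split
        · exact hx'
        · exact lt_of_lt_of_le hx' (not_lt.mp (by assumption))
      have hcut : pvCut t (x :: r) = 0 := by simp [pvCut, hx]
      rw [hcut]
      match i with
      | 0 =>
        simp only [hcons, List.getElem_cons_zero]
        exact iff_of_false (not_le.mpr hrun') (by omega)
      | Nat.succ j =>
        have hj : j < (pvPmList (if run < x then x else run) r).length := by
          rw [hcons] at hi; simp only [List.length_cons] at hi; omega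
        simp only [hcons, List.getElem_cons_succ]
        have hge := pvPmList_ge _ r _ (List.getElem_mem hj)
        exact iff_of_false (not_le.mpr (lt_of_lt_of_le hrun' hge)) (by omega)

-- binary search on a list characterised by a cut index lands on that index
theorem pvBisect_eq (pm : List String) (t : String) (k : Nat)
    (H : ∀ i (hi : i < pm.length), (pm[i] ≤ t ↔ i < k)) (_hk : k ≤ pm.length) :
    ∀ fuel lo hi, hi - lo ≤ fuel → lo ≤ k → k ≤ hi → hi ≤ pm.length →
      pvBisectGo pm t fuel lo hi = k := by
  intro fuel
  induction fuel with
  | zero => intro lo hi hf hlo hhi _; simp only [pvBisectGo]; omega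
  | succ f ih =>
    intro lo hi hf hlo hhi hlen
    rw [pvBisectGo]
    by_cases h : lo < hi
    · simp only [h, if_pos]
      have hmid : (lo + hi) / 2 < pm.length := by omega
      have hgd : pm.getD ((lo + hi) / 2) "" = pm[(lo + hi) / 2] := List.getD_eq_getElem _ _ hmid
      by_cases hc : t < pm[(lo + hi) / 2]
      · have hnk : k ≤ (lo + hi) / 2 := by
          by_contra hcon
          exact absurd ((H _ hmid).2 (by omega)) (not_le.mpr hc)
        rw [hgd, if_pos hc]
        exact ih lo ((lo + hi) / 2) (by omega) hlo hnk (by omega)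
      · have hkk : (lo + hi) / 2 < k := (H _ hmid).1 (not_lt.mp hc)
        rw [hgd, if_neg hc]
        exact ih ((lo + hi) / 2 + 1) hi (by omega) (by omega) hhi hlen
    · simp only [h, if_neg, not_false_iff]
      omega

-- the empty string is the bottom of Python's string order
theorem pvEmpty_le (s : String) : "" ≤ s := by
  by_contra h
  have h2 : s < "" := not_le.mp h
  rw [String.lt_iff_toList_lt] at h2
  exact List.not_lt_nil _ h2

-- per-trade agreement: A's scan result = B's binary-search result
theorem pvPer_trade (t : String) (ds : List (List (String × String))) :
    pvInnerA t ds [] =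
      (if 0 < pvBisect (pvPrefixMax ds) t 0 (pvPrefixMax ds).length
       then ds.getD (pvBisect (pvPrefixMax ds) t 0 (pvPrefixMax ds).length - 1) [] else []) := by
  have hpm : pvPrefixMax ds = pvPmList "" (ds.map pvTsOf) := by
    unfold pvPrefixMax; rw [pvPrefixMax_foldl]; simp
  have hlen : (pvPmList "" (ds.map pvTsOf)).length = (ds.map pvTsOf).length := pvPmList_length _ _
  have hk : pvCut t (ds.map pvTsOf) ≤ (pvPmList "" (ds.map pvTsOf)).length := by
    rw [hlen]; exact pvCut_le_length _ _
  have hb : pvBisect (pvPmList "" (ds.map pvTsOf)) t 0 (pvPmList "" (ds.map pvTsOf)).length = pvCut t (ds.map pvTsOf) :=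
    pvBisect_eq _ t _ (pvPmList_char t "" (ds.map pvTsOf) (pvEmpty_le t)) hk _ 0 _ le_rfl (Nat.zero_le _) hk le_rfl
  rw [hpm, hb, pvInnerA_eq]
  by_cases h0 : pvCut t (ds.map pvTsOf) = 0
  · simp [h0]
  · simp [h0, Nat.pos_of_ne_zero h0]

-- ===== VERDICT (by name: the statement is the Claim_ definition above) =====
theorem match_trades_to_decisions_spec : Claim_equal_match_trades_to_decisions := by
  intro trades decisions _
  unfold Spec_match_trades_to_decisions match_trades_to_decisions match_trades_to_decisions_alt
  rw [PySem.List.foldl_append_singleton_eq_map, PySem.List.foldl_append_singleton_eq_map]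
  apply List.map_congr_left
  intro trade _
  simp only [pvPer_trade]
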